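-- pv_equiv track=rewrite | github.com/multani/my-sonata | sonata/formatting.py | split_on_braces
-- ===== SOURCE A (Python) =====
-- def split_on_braces(format):
--     """Split format along the { and } characters."""
--
--     substrings = []
--     end = format
--     while len(end) > 0:
--         begin, sep1, end = end.partition('{')
--         substrings.append(begin)
--         if len(end) == 0:
--             if sep1:
--                 substrings.append(sep1)
--             break
--         begin, sep2, end = end.partition('}')
--         substrings.append(sep1 + begin + sep2)
--     return substrings
-- ===== SOURCE B (Python) =====
-- def split_on_braces(format):
--     """Split format along the { and } characters."""
--     out = []
--     buf = []
--     i = 0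
--     n = len(format)
--     while i < n:
--         if format[i] == '{':
--             out.append(''.join(buf))
--             buf = []
--             j = format.find('}', i)
--             if j == -1:
--                 out.append(format[i:])
--                 return out
--             out.append(format[i:j + 1])
--             i = j + 1
--         else:
--             buf.append(format[i])
--             i += 1
--     if buf:
--         out.append(''.join(buf))
--     return out
-- ===== Notes on version B (the rewrite author's own statement) =====
-- stated objective: idiomatic
-- what changed: Replaces the repeated str.partition loop (which rescans and rebuilds remainder strings) with a single-pass character state machine that accumulates a text buffer, flushes it at each '{', and takes the brace token up to the first '}' via find.
import Mathlib
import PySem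

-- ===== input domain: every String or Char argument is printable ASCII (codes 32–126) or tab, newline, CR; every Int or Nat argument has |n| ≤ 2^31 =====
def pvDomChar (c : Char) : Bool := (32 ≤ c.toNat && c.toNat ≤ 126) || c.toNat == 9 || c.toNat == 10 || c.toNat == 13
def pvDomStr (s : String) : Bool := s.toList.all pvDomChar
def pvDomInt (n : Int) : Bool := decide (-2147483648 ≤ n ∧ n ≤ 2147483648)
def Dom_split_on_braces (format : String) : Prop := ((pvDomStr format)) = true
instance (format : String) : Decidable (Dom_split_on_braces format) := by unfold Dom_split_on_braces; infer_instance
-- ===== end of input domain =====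

-- B replaces A's repeated str.partition loop by a one-pass buffer/state-machine tokenizer; return values agree everywhere.

-- ===== PORT A =====
-- Python's s.partition(c) for a one-character separator, over List Char:
-- (before first c, [c], after), or (s, [], []) when c is absent — exact.
def pyPartition (c : Char) : List Char → List Char × List Char × List Char
  | [] => ([], [], [])
  | x :: xs =>
    if x = c then ([], [c], xs)
    else
      let r := pyPartition c xs
      (x :: r.1, r.2.1, r.2.2)

-- used by loopA's termination proof
theorem pyPartition_len (c : Char) (l : List Char) :
    (pyPartition c l).2.2.length ≤ l.length ∧
    ((pyPartition c l).2.2 ≠ [] → (pyPartition c l).2.2.length < l.length) := by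
  induction l with
  | nil => simp [pyPartition]
  | cons x xs ih =>
    by_cases h : x = c
    · simp [pyPartition, h]
    · simp [pyPartition, h]
      omega

-- A's while loop, step for step (substrings accumulated in order in acc).
def loopA (e : List Char) (acc : List (List Char)) : List (List Char) :=
  if e = [] then acc
  else
    let p1 := pyPartition '{' e
    let acc1 := acc ++ [p1.1]
    if h1 : p1.2.2 = [] then
      if p1.2.1 ≠ [] then acc1 ++ [p1.2.1] else acc1
    else
      let p2 := pyPartition '}' p1.2.2
      loopA p2.2.2 (acc1 ++ [p1.2.1 ++ p2.1 ++ p2.2.1])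
  termination_by e.length
  decreasing_by
    have h := pyPartition_len '{' e
    have h' := pyPartition_len '}' (pyPartition '{' e).2.2
    exact lt_of_le_of_lt h'.1 (h.2 h1)

def split_on_braces (format : String) : List String :=
  (loopA format.toList []).map String.ofList

-- ===== PORT B =====
-- Source B's `format.find('}', i)` plus the slices format[i:j+1] / format[i:], on a
-- char list: (chars from here through the first '}', rest), or none if no '}'.
def findClose : List Char → Option (List Char × List Char)
  | [] => none
  | x :: xs =>
    if x = '}' then some ([x], xs)
    else (findClose xs).map (fun r => (x :: r.1, r.2))

-- Source B's while loop: buf is the pending text buffer, out the result list.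
-- The fuel argument is only a termination guard; split_on_braces_alt passes
-- the input length, which each iteration's ≥1-char progress never exhausts.
def loopB : Nat → List Char → List Char → List (List Char) → List (List Char)
  | _, [], buf, out => if buf ≠ [] then out ++ [buf] else out
  | 0, _ :: _, _, out => out
  | n + 1, c :: rest, buf, out =>
    if c = '{' then
      match findClose (c :: rest) with
      | none => out ++ [buf] ++ [c :: rest]
      | some (t, r) => loopB n r [] (out ++ [buf] ++ [t])
    else loopB n rest (buf ++ [c]) out

def split_on_braces_alt (format : String) : List String :=
  (loopB format.toList.length format.toList [] []).map String.ofList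

-- ===== PRECONDITION & SPEC =====
def Spec_split_on_braces (format : String) (out : List String) : Prop := out = split_on_braces_alt format
instance (format : String) (out : List String) : Decidable (Spec_split_on_braces format out) := by unfold Spec_split_on_braces; infer_instance

-- ===== CLAIM (what is proved, stated in full; the proofs are below) =====
def Claim_equal_split_on_braces : Prop := ∀ (format : String), Dom_split_on_braces format → Spec_split_on_braces format (split_on_braces format)

-- ===== LEMMAS AND PROOFS =====

-- partition skips over a prefix not containing the separator
theorem pyPartition_append (c : Char) (buf l : List Char) (hb : c ∉ buf) :
    pyPartition c (buf ++ l) =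
      (buf ++ (pyPartition c l).1, (pyPartition c l).2.1, (pyPartition c l).2.2) := by
  induction buf with
  | nil => simp
  | cons x xs ih =>
    simp only [List.mem_cons, not_or] at hb
    simp [pyPartition, Ne.symm hb.1, ih hb.2]

theorem findClose_len (l : List Char) (t r : List Char) :
    findClose l = some (t, r) → r.length < l.length := by
  induction l generalizing t r with
  | nil => simp [findClose]
  | cons x xs ih =>
    by_cases h : x = '}'
    · simp only [findClose, if_pos h]
      intro he
      cases he
      simp
    · simp only [findClose, if_neg h, Option.map_eq_some_iff]
      rintro ⟨⟨t', r'⟩, hf, he⟩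
      cases he
      exact Nat.lt_trans (ih _ _ hf) (by simp)

-- findClose vs partition '}': some exactly when '}' is present
theorem findClose_partition (l : List Char) :
    (findClose l = none ∧ pyPartition '}' l = (l, [], []) ∨
     ∃ t r, findClose l = some (t, r) ∧
       pyPartition '}' l = (t.dropLast, ['}'], r) ∧ t = t.dropLast ++ ['}']) := by
  induction l with
  | nil => left; simp [findClose, pyPartition]
  | cons x xs ih =>
    by_cases h : x = '}'
    · subst h
      right
      exact ⟨['}'], xs, by simp [findClose], by simp [pyPartition], by simp⟩
    · rcases ih with ⟨hf, hp⟩ | ⟨t, r, hf, hp, ht⟩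
      · left
        simp [findClose, h, hf, pyPartition, hp]
      · right
        have htne : t ≠ [] := by rintro rfl; simp at ht
        refine ⟨x :: t, r, ?_, ?_, ?_⟩
        · simp [findClose, h, hf]
        · simp [pyPartition, h, hp, List.dropLast_cons_of_ne_nil htne]
        · rw [List.dropLast_cons_of_ne_nil htne]
          simpa using ht

-- A's loop on a brace-free remainder: emit it unless empty
theorem loopA_text (buf : List Char) (out : List (List Char)) (hb : '{' ∉ buf) :
    loopA buf out = if buf ≠ [] then out ++ [buf] else out := by
  rw [loopA]
  by_cases h : buf = []
  · simp [h]
  · have hp := pyPartition_append '{' buf [] hb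
    simp [pyPartition] at hp
    simp [h, hp]

theorem loopA_nil (acc : List (List Char)) : loopA [] acc = acc := by
  rw [loopA]; simp

-- main invariant: B's loop with pending buffer buf equals A's loop on buf ++ l
theorem loopB_eq_loopA (n : ℕ) (l buf : List Char) (out : List (List Char))
    (hn : l.length ≤ n) (hb : '{' ∉ buf) :
    loopB n l buf out = loopA (buf ++ l) out := by
  induction n generalizing l buf out with
  | zero =>
    have hl : l = [] := List.eq_nil_of_length_eq_zero (Nat.le_zero.mp hn)
    subst hl
    rw [loopB]
    simp only [List.append_nil]
    exact (loopA_text buf out hb).symm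
  | succ n ih =>
    cases l with
    | nil =>
      rw [loopB]
      simp only [List.append_nil]
      exact (loopA_text buf out hb).symm
    | cons c rest =>
      simp only [List.length_cons, Nat.succ_le_succ_iff] at hn
      by_cases hc : c = '{'
      · subst hc
        have hA : pyPartition '{' (buf ++ '{' :: rest) = (buf, ['{'], rest) := by
          rw [pyPartition_append '{' buf ('{' :: rest) hb]
          simp [pyPartition]
        rw [loopB, loopA]
        have hne : buf ++ '{' :: rest ≠ [] := by simp
        simp only [if_neg hne, hA]
        simp only [findClose, if_neg (by decide : ¬('{' = '}'))]
        rcases findClose_partition rest with ⟨hf2, hp2⟩ | ⟨t2, r2, hf2, hp2, ht2⟩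
        · rw [hf2]
          by_cases hrest : rest = []
          · subst hrest; simp
          · simp only [Option.map_none, dif_neg hrest, hp2, loopA_nil]
            simp
        · have hrest : rest ≠ [] := by rintro rfl; simp [findClose] at hf2
          rw [hf2]
          simp only [Option.map_some, dif_neg hrest, hp2]
          have hlen : r2.length ≤ n := by
            have := findClose_len rest t2 r2 hf2
            omega
          rw [ih r2 [] _ hlen (by simp)]
          simp only [List.nil_append]
          rw [ht2]
          simp
      · rw [loopB]
        simp only [if_neg hc]
        rw [ih rest (buf ++ [c]) out hn (by simp [hb, Ne.symm hc])]
        simp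

-- ===== VERDICT (by name: the statement is the Claim_ definition above) =====
theorem split_on_braces_spec : Claim_equal_split_on_braces := by
  intro format _
  unfold Spec_split_on_braces split_on_braces split_on_braces_alt
  rw [loopB_eq_loopA format.toList.length format.toList [] [] le_rfl (by simp)]
  simp
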